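-- pv_equiv track=rewrite | github.com/gallori-ai/topology-aware-sdm | code/topology_aware_sdm.py | rank_by_hamming
-- ===== SOURCE A (Python) =====
-- def hamming(a: int, b: int) -> int:
--     """
--     Hamming distance via Python 3.10+ int.bit_count().
--     Internally uses hardware POPCNT instruction.
--     """
--     return (a ^ b).bit_count()
--
-- def rank_by_hamming(
--     query: int,
--     addresses: dict[str, int],
-- ) -> list[tuple[int, str]]:
--     """
--     Rank all nodes by Hamming distance to query address.
--
--     Returns: list of (distance, node_id) sorted ascending by distance.
--     """
--     return sorted(
--         ((hamming(query, addr), nid) for nid, addr in addresses.items()),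
--         key=lambda x: x[0],
--     )
-- ===== SOURCE B (Python) =====
-- def hamming(a: int, b: int) -> int:
--     return (a ^ b).bit_count()
--
-- def rank_by_hamming(
--     query: int,
--     addresses: dict[str, int],
-- ) -> list[tuple[int, str]]:
--     # Bucket by distance, then emit buckets by ascending distance:
--     # sorts only the distinct distances instead of the whole pair list;
--     # within a bucket, insertion order preserves stable-sort tie-breaking.
--     buckets: dict[int, list[tuple[int, str]]] = {}
--     for nid, addr in addresses.items():
--         d = hamming(query, addr)
--         buckets.setdefault(d, []).append((d, nid))
--     out: list[tuple[int, str]] = []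
--     for d in sorted(buckets):
--         out.extend(buckets[d])
--     return out
-- ===== Notes on version B (the rewrite author's own statement) =====
-- stated objective: alternative
-- what changed: Replaces the full comparison sort of all (distance, id) pairs by a single bucketing pass into a dict keyed by distance followed by emitting buckets in ascending order of the (few) distinct distances; within-bucket insertion order reproduces the stable sort's tie-breaking.
import Mathlib
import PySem

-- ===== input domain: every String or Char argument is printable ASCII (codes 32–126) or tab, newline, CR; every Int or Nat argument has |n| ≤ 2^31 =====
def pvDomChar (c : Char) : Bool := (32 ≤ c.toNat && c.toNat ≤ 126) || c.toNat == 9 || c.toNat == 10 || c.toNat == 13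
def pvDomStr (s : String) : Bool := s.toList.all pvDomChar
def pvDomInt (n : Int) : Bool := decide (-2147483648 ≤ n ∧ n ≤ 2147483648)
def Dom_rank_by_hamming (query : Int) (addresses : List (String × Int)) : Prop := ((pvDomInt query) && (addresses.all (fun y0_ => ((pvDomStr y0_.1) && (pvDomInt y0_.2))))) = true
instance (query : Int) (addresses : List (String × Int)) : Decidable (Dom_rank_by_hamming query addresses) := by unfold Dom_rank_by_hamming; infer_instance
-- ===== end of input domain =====

-- B replaces the full stable comparison sort of all (distance, id) pairs by one bucketing
-- pass into a dict keyed by distance followed by emitting buckets in ascending key order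
-- (objective: alternative algorithm of similar cost).

-- ===== PORT A =====
-- helper `hamming` of the module: (a ^ b).bit_count()
def pvHamming (a : Int) (b : Int) : Int := ((PySem.Int.bitCount (PySem.Int.bxor a b) : Nat) : Int)

def rank_by_hamming (query : Int) (addresses : List (String × Int)) : List (Int × String) :=
  PySem.List.sorted (addresses.map (fun p => (pvHamming query p.2, p.1))) (fun x => x.1) false

-- ===== PORT B =====
-- buckets.setdefault(d, []).append((d, nid)) is Dict.modify d [] (· ++ [(d, nid)])
def rank_by_hamming_alt (query : Int) (addresses : List (String × Int)) : List (Int × String) :=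
  let buckets : PySem.Dict Int (List (Int × String)) :=
    addresses.foldl (fun d p =>
      let dist := pvHamming query p.2
      d.modify dist [] (fun v => v ++ [(dist, p.1)])) PySem.Dict.empty
  (PySem.List.sorted buckets.keys (fun c => c) false).foldl
    (fun out c => out ++ buckets.getD c []) []

-- ===== PRECONDITION & SPEC =====
def Spec_rank_by_hamming (query : Int) (addresses : List (String × Int)) (out : List (Int × String)) : Prop := out = rank_by_hamming_alt query addresses
instance (query : Int) (addresses : List (String × Int)) (out : List (Int × String)) : Decidable (Spec_rank_by_hamming query addresses out) := by unfold Spec_rank_by_hamming; infer_instance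

-- ===== CLAIM (what is proved, stated in full; the proofs are below) =====
def Claim_equal_rank_by_hamming : Prop := ∀ (query : Int) (addresses : List (String × Int)), Dom_rank_by_hamming query addresses → Spec_rank_by_hamming query addresses (rank_by_hamming query addresses)

-- ===== LEMMAS AND PROOFS =====

-- insertBy skips over a prefix on which `before` is false
theorem pv_insertBy_append (before : (Int × String) → (Int × String) → Bool)
    (x : Int × String) (u v : List (Int × String))
    (h : ∀ y ∈ u, before x y = false) :
    PySem.List.insertBy before x (u ++ v) = u ++ PySem.List.insertBy before x v := by
  induction u with
  | nil => rfl
  | cons y u ih =>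
    simp only [List.cons_append, PySem.List.insertBy, h y (by simp)]
    simp only [Bool.false_eq_true, if_false, List.cons.injEq, true_and]
    exact ih (fun z hz => h z (by simp [hz]))

-- elements surviving dropWhile (· ≤ c0) in a strictly increasing list are > c0
theorem pv_mem_dropWhile_gt (c0 : Int) : ∀ (ks : List Int), ks.Pairwise (· < ·) →
    ∀ c ∈ ks.dropWhile (fun c => decide (c ≤ c0)), c0 < c := by
  intro ks
  induction ks with
  | nil => intro _ c hc; simp [List.dropWhile] at hc
  | cons k ks ih =>
    intro hp c hc
    rcases List.pairwise_cons.mp hp with ⟨hk, hp'⟩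
    by_cases hle : k ≤ c0
    · rw [List.dropWhile_cons_of_pos (by simpa using hle)] at hc
      exact ih hp' c hc
    · rw [List.dropWhile_cons_of_neg (by simpa using hle)] at hc
      rcases List.mem_cons.mp hc with rfl | hc
      · omega
      · exact lt_trans (by omega) (hk c hc)

-- takeWhile (· ≤ c0) of a strictly increasing list splits at c0
theorem pv_takeWhile_le_split (c0 : Int) : ∀ (ks : List Int), ks.Pairwise (· < ·) →
    ks.takeWhile (fun c => decide (c ≤ c0)) =
      ks.takeWhile (fun c => decide (c < c0)) ++ (if c0 ∈ ks then [c0] else []) := by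
  intro ks
  induction ks with
  | nil => intro _; simp
  | cons k ks ih =>
    intro hp
    rcases List.pairwise_cons.mp hp with ⟨hk, hp'⟩
    rcases lt_trichotomy k c0 with hlt | rfl | hgt
    · have hmem : (c0 ∈ k :: ks) ↔ (c0 ∈ ks) := by
        simp only [List.mem_cons, or_iff_right_iff_imp]
        intro h; omega
      rw [List.takeWhile_cons_of_pos (by simpa using le_of_lt hlt),
        List.takeWhile_cons_of_pos (by simpa using hlt), ih hp']
      by_cases hc : c0 ∈ ks
      · rw [if_pos hc, if_pos (hmem.mpr hc)]; rfl
      · rw [if_neg hc, if_neg (fun h => hc (hmem.mp h))]; simp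
    · have h1 : ks.takeWhile (fun c => decide (c ≤ k)) = [] := by
        cases hks : ks with
        | nil => simp
        | cons a t =>
          have : k < a := hk a (by simp [hks])
          rw [List.takeWhile_cons_of_neg (by simpa using (by omega : ¬ a ≤ k))]
      rw [List.takeWhile_cons_of_pos (by simp), h1,
        List.takeWhile_cons_of_neg (by simp), if_pos (by simp)]
      rfl
    · have hnm : c0 ∉ k :: ks := by
        simp only [List.mem_cons, not_or]
        exact ⟨by omega, fun hc => absurd (hk c0 hc) (by omega)⟩
      rw [List.takeWhile_cons_of_neg (by simpa using (by omega : ¬ k ≤ c0)),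
        List.takeWhile_cons_of_neg (by simpa using (by omega : ¬ k < c0)), if_neg hnm]
      rfl

-- inserting `a` into a bucket concatenation lands right after the buckets with key ≤ a.1
theorem pv_insertBy_flatMap (a : Int × String) :
    ∀ (ks : List Int) (B : Int → List (Int × String)),
    ks.Pairwise (· < ·) →
    (∀ c ∈ ks, ∀ x ∈ B c, x.1 = c) →
    (∀ c ∈ ks, B c ≠ []) →
    PySem.List.insertBy (fun p q => decide (p.1 < q.1)) a (ks.flatMap B)
      = (ks.takeWhile (fun c => decide (c ≤ a.1))).flatMap B
        ++ a :: (ks.dropWhile (fun c => decide (c ≤ a.1))).flatMap B := by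
  intro ks
  induction ks with
  | nil => intro B _ _ _; rfl
  | cons c ks ih =>
    intro B hp hkeys hne
    rcases List.pairwise_cons.mp hp with ⟨_, hp'⟩
    by_cases hle : c ≤ a.1
    · have hskip : ∀ y ∈ B c, (fun p q : Int × String => decide (p.1 < q.1)) a y = false := by
        intro y hy
        have := hkeys c (by simp) y hy
        simp only [decide_eq_false_iff_not, not_lt]
        omega
      rw [List.flatMap_cons, pv_insertBy_append _ _ _ _ hskip,
        ih B hp' (fun d hd => hkeys d (by simp [hd])) (fun d hd => hne d (by simp [hd])),
        List.takeWhile_cons_of_pos (by simpa using hle),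
        List.dropWhile_cons_of_pos (by simpa using hle)]
      simp
    · rcases List.exists_cons_of_ne_nil (hne c (by simp)) with ⟨y0, t, hB⟩
      have hy0 : y0.1 = c := hkeys c (by simp) y0 (by simp [hB])
      have hbefore : (fun p q : Int × String => decide (p.1 < q.1)) a y0 = true := by
        simp only [decide_eq_true_eq, hy0]; omega
      rw [List.flatMap_cons, hB,
        List.takeWhile_cons_of_neg (by simpa using hle),
        List.dropWhile_cons_of_neg (by simpa using hle)]
      simp only [List.cons_append, PySem.List.insertBy, hbefore, if_true]
      simp [hB]

-- keys of a Dict.insert, as a set-add on the key list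
theorem pv_keys_insert (d : PySem.Dict Int (List (Int × String))) (k : Int)
    (v : List (Int × String)) : (d.insert k v).keys = PySem.Set.add d.keys k := by
  by_cases hc : d.contains k = true
  · rw [PySem.Set.add_of_mem ((PySem.Dict.contains_iff_mem_keys d k).mp hc)]
    simp only [PySem.Dict.insert, hc, if_true, PySem.Dict.keys, List.map_map]
    refine List.map_congr_left (fun p _ => ?_)
    by_cases hpk : (p.1 == k) = true
    · simp [Function.comp, (beq_iff_eq.mp hpk).symm]
    · simp [Function.comp, hpk]
  · rw [PySem.Set.add_of_not_mem (fun h => hc ((PySem.Dict.contains_iff_mem_keys d k).mpr h))]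
    simp [PySem.Dict.insert, hc, PySem.Dict.keys]

-- keys of the bucket-building fold, with the value depending on the whole pair
theorem pv_keys_fold (l : List (Int × (Int × String))) :
    ∀ (d : PySem.Dict Int (List (Int × String))),
    (l.foldl (fun d q => d.modify q.1 [] (fun v => v ++ [q.2])) d).keys
      = PySem.Set.update d.keys (l.map (·.1)) := by
  induction l with
  | nil => intro d; rfl
  | cons q l ih =>
    intro d
    rw [List.foldl_cons, ih, List.map_cons, PySem.Dict.keys_modify, pv_keys_insert]
    rfl

-- B in closed form: buckets of the sorted distinct keys
theorem pv_alt_eq_flatMap (query : Int) (addresses : List (String × Int)) :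
    rank_by_hamming_alt query addresses
      = (PySem.List.sorted
          (PySem.Set.ofList ((addresses.map (fun p => (pvHamming query p.2, p.1))).map (·.1)))
          (fun c => c) false).flatMap
          (fun c => (addresses.map (fun p => (pvHamming query p.2, p.1))).filter (fun x => x.1 == c)) := by
  have e1 : rank_by_hamming_alt query addresses
      = (PySem.List.sorted (addresses.foldl (fun d p =>
            d.modify (pvHamming query p.2) [] (fun v => v ++ [(pvHamming query p.2, p.1)]))
            PySem.Dict.empty).keys (fun c => c) false).foldl
          (fun out c => out ++ (addresses.foldl (fun d p =>
            d.modify (pvHamming query p.2) [] (fun v => v ++ [(pvHamming query p.2, p.1)]))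
            PySem.Dict.empty).getD c []) [] := rfl
  have hfold : addresses.foldl (fun d p =>
      let dist := pvHamming query p.2
      d.modify dist [] (fun v => v ++ [(dist, p.1)])) PySem.Dict.empty
      = (addresses.map (fun p => (pvHamming query p.2, (pvHamming query p.2, p.1)))).foldl
          (fun d q => d.modify q.1 [] (fun v => v ++ [q.2])) PySem.Dict.empty := by
    rw [List.foldl_map]
  have hfold' : addresses.foldl (fun d p =>
      d.modify (pvHamming query p.2) [] (fun v => v ++ [(pvHamming query p.2, p.1)])) PySem.Dict.empty
      = (addresses.map (fun p => (pvHamming query p.2, (pvHamming query p.2, p.1)))).foldl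
          (fun d q => d.modify q.1 [] (fun v => v ++ [q.2])) PySem.Dict.empty := hfold
  rw [e1, hfold']
  have hkeys : ((addresses.map (fun p => (pvHamming query p.2, (pvHamming query p.2, p.1)))).foldl
      (fun d q => d.modify q.1 [] (fun v => v ++ [q.2])) PySem.Dict.empty).keys
      = PySem.Set.ofList ((addresses.map (fun p => (pvHamming query p.2, p.1))).map (·.1)) := by
    rw [pv_keys_fold, PySem.Dict.keys_empty, PySem.Set.ofList_eq_foldl, List.map_map, List.map_map]
    rfl
  have hgetD : ∀ c : Int, ((addresses.map (fun p => (pvHamming query p.2, (pvHamming query p.2, p.1)))).foldl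
      (fun d q => d.modify q.1 [] (fun v => v ++ [q.2])) PySem.Dict.empty).getD c []
      = (addresses.map (fun p => (pvHamming query p.2, p.1))).filter (fun x => x.1 == c) := by
    intro c
    rw [PySem.Dict.getD_foldl_modify_append, List.filter_map, List.filter_map, List.map_map]
    rfl
  have hfun : (fun (out : List (Int × String)) c =>
        out ++ ((addresses.map (fun p => (pvHamming query p.2, (pvHamming query p.2, p.1)))).foldl
          (fun d q => d.modify q.1 [] (fun v => v ++ [q.2])) PySem.Dict.empty).getD c [])
      = fun out c => out ++ (addresses.map (fun p => (pvHamming query p.2, p.1))).filter (fun x => x.1 == c) := by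
    funext out c
    rw [hgetD]
  rw [hkeys, hfun, PySem.List.foldl_append_eq_flatMap, List.nil_append]

-- a stable sort by key is the concatenation of its key-buckets in ascending key order
theorem pv_sorted_eq_flatMap (xs : List (Int × String)) :
    PySem.List.sorted xs (fun x => x.1) false
      = (PySem.List.sorted (PySem.Set.ofList (xs.map (·.1))) (fun c => c) false).flatMap
          (fun c => xs.filter (fun x => x.1 == c)) := by
  induction xs using List.reverseRecOn with
  | nil => rfl
  | append_singleton xs a ih =>
    have hL : PySem.List.sorted (xs ++ [a]) (fun x : Int × String => x.1) false
        = PySem.List.insertBy (fun p q : Int × String => decide (p.1 < q.1)) a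
            (PySem.List.sorted xs (fun x => x.1) false) := by
      rw [PySem.List.sorted_eq_foldl_insertBy, PySem.List.sorted_eq_foldl_insertBy,
        List.foldl_append]
      rfl
    have hks := PySem.List.sorted_ofList_pairwise_lt (xs.map (·.1))
    have hmemks : ∀ c : Int, c ∈ PySem.List.sorted (PySem.Set.ofList (xs.map (·.1))) (fun c => c) false
        ↔ c ∈ xs.map (·.1) := by
      intro c
      rw [PySem.List.mem_sorted, PySem.Set.mem_ofList]
    have hkeys : ∀ c ∈ PySem.List.sorted (PySem.Set.ofList (xs.map (·.1))) (fun c => c) false,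
        ∀ x ∈ xs.filter (fun x => x.1 == c), x.1 = c := by
      intro c _ x hx
      exact beq_iff_eq.mp (List.mem_filter.mp hx).2
    have hne : ∀ c ∈ PySem.List.sorted (PySem.Set.ofList (xs.map (·.1))) (fun c => c) false,
        xs.filter (fun x => x.1 == c) ≠ [] := by
      intro c hc
      rcases List.mem_map.mp ((hmemks c).mp hc) with ⟨p, hp, hpc⟩
      exact List.ne_nil_of_mem (List.mem_filter.mpr ⟨hp, by simp [hpc]⟩)
    rw [hL, ih, pv_insertBy_flatMap a _ _ hks hkeys hne]
    have hset : PySem.Set.ofList ((xs ++ [a]).map (·.1))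
        = PySem.Set.add (PySem.Set.ofList (xs.map (·.1))) a.1 := by
      rw [List.map_append, PySem.Set.ofList_eq_foldl, List.foldl_append,
        ← PySem.Set.ofList_eq_foldl]
      rfl
    have hB' : ∀ c : Int, (xs ++ [a]).filter (fun x => x.1 == c)
        = xs.filter (fun x => x.1 == c) ++ (if a.1 = c then [a] else []) := by
      intro c
      rw [List.filter_append]
      by_cases hac : a.1 = c
      · simp [List.filter, hac]
      · have hbc : (a.1 == c) = false := by simpa using hac
        simp [List.filter, hbc, hac]
    by_cases hmem : a.1 ∈ PySem.List.sorted (PySem.Set.ofList (xs.map (·.1))) (fun c => c) false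
    · -- a's distance already occurs: same key list, a appended to its bucket
      have hsetmem : a.1 ∈ PySem.Set.ofList (xs.map (·.1)) :=
        (PySem.Set.mem_ofList _ _).mpr ((hmemks a.1).mp hmem)
      rw [hset, PySem.Set.add_of_mem hsetmem]
      have hsplit := pv_takeWhile_le_split a.1 _ hks
      rw [if_pos hmem] at hsplit
      conv_rhs => rw [← List.takeWhile_append_dropWhile
        (p := fun c => decide (c ≤ a.1))
        (l := PySem.List.sorted (PySem.Set.ofList (xs.map (·.1))) (fun c => c) false)]
      rw [hsplit, List.flatMap_append, List.flatMap_append, List.flatMap_append]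
      have htw : ((PySem.List.sorted (PySem.Set.ofList (xs.map (·.1))) (fun c => c) false).takeWhile
            (fun c => decide (c < a.1))).flatMap (fun c => (xs ++ [a]).filter (fun x => x.1 == c))
          = ((PySem.List.sorted (PySem.Set.ofList (xs.map (·.1))) (fun c => c) false).takeWhile
            (fun c => decide (c < a.1))).flatMap (fun c => xs.filter (fun x => x.1 == c)) := by
        refine List.flatMap_congr (fun c hc => ?_)
        have : c < a.1 := by simpa using List.mem_takeWhile_imp hc
        rw [hB' c, if_neg (by omega), List.append_nil]
      have hdw : ((PySem.List.sorted (PySem.Set.ofList (xs.map (·.1))) (fun c => c) false).dropWhile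
            (fun c => decide (c ≤ a.1))).flatMap (fun c => (xs ++ [a]).filter (fun x => x.1 == c))
          = ((PySem.List.sorted (PySem.Set.ofList (xs.map (·.1))) (fun c => c) false).dropWhile
            (fun c => decide (c ≤ a.1))).flatMap (fun c => xs.filter (fun x => x.1 == c)) := by
        refine List.flatMap_congr (fun c hc => ?_)
        have := pv_mem_dropWhile_gt a.1 _ hks c hc
        rw [hB' c, if_neg (by omega), List.append_nil]
      rw [htw, hdw]
      simp
    · -- a's distance is new: its singleton bucket is spliced in at the sorted position
      have hsetnmem : a.1 ∉ PySem.Set.ofList (xs.map (·.1)) := by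
        intro h
        exact hmem ((PySem.List.mem_sorted _ _ false a.1).mpr h)
      have hBnil : xs.filter (fun x => x.1 == a.1) = [] := by
        rw [List.filter_eq_nil_iff]
        intro x hx hxc
        exact hsetnmem ((PySem.Set.mem_ofList _ _).mpr
          (List.mem_map.mpr ⟨x, hx, beq_iff_eq.mp hxc⟩))
      have hsplit := pv_takeWhile_le_split a.1 _ hks
      rw [if_neg hmem, List.append_nil] at hsplit
      -- the new sorted key list
      have hsortednew : PySem.List.sorted (PySem.Set.ofList (xs.map (·.1)) ++ [a.1]) (fun c : Int => c) false
          = ((PySem.List.sorted (PySem.Set.ofList (xs.map (·.1))) (fun c => c) false).takeWhile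
              (fun c => decide (c < a.1)))
            ++ a.1 :: ((PySem.List.sorted (PySem.Set.ofList (xs.map (·.1))) (fun c => c) false).dropWhile
              (fun c => decide (c ≤ a.1))) := by
        apply PySem.List.sorted_eq_of_perm_of_pairwise_lt
        · refine List.Perm.trans List.perm_middle ?_
          rw [← hsplit, List.takeWhile_append_dropWhile]
          exact List.Perm.trans
            (List.Perm.cons a.1 (PySem.List.sorted_perm _ _ false))
            (List.perm_append_singleton a.1 _).symm
        · rw [List.pairwise_append]
          refine ⟨List.Pairwise.sublist (List.takeWhile_sublist _) hks, ?_, ?_⟩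
          · rw [List.pairwise_cons]
            exact ⟨pv_mem_dropWhile_gt a.1 _ hks, List.Pairwise.sublist (List.dropWhile_sublist _) hks⟩
          · intro x hx y hy
            have hxlt : x < a.1 := by simpa using List.mem_takeWhile_imp hx
            rcases List.mem_cons.mp hy with rfl | hy
            · exact hxlt
            · exact lt_trans hxlt (pv_mem_dropWhile_gt a.1 _ hks y hy)
      rw [hset, hsplit, PySem.Set.add_of_not_mem hsetnmem, hsortednew,
        List.flatMap_append, List.flatMap_cons]
      have htw : ((PySem.List.sorted (PySem.Set.ofList (xs.map (·.1))) (fun c => c) false).takeWhile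
            (fun c => decide (c < a.1))).flatMap (fun c => (xs ++ [a]).filter (fun x => x.1 == c))
          = ((PySem.List.sorted (PySem.Set.ofList (xs.map (·.1))) (fun c => c) false).takeWhile
            (fun c => decide (c < a.1))).flatMap (fun c => xs.filter (fun x => x.1 == c)) := by
        refine List.flatMap_congr (fun c hc => ?_)
        have : c < a.1 := by simpa using List.mem_takeWhile_imp hc
        rw [hB' c, if_neg (by omega), List.append_nil]
      have hdw : ((PySem.List.sorted (PySem.Set.ofList (xs.map (·.1))) (fun c => c) false).dropWhile
            (fun c => decide (c ≤ a.1))).flatMap (fun c => (xs ++ [a]).filter (fun x => x.1 == c))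
          = ((PySem.List.sorted (PySem.Set.ofList (xs.map (·.1))) (fun c => c) false).dropWhile
            (fun c => decide (c ≤ a.1))).flatMap (fun c => xs.filter (fun x => x.1 == c)) := by
        refine List.flatMap_congr (fun c hc => ?_)
        have := pv_mem_dropWhile_gt a.1 _ hks c hc
        rw [hB' c, if_neg (by omega), List.append_nil]
      rw [htw, hdw, hB' a.1, if_pos rfl, hBnil]
      simp

-- ===== VERDICT (by name: the statement is the Claim_ definition above) =====
theorem rank_by_hamming_spec : Claim_equal_rank_by_hamming := by
  intro query addresses _
  unfold Spec_rank_by_hamming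
  rw [pv_alt_eq_flatMap, rank_by_hamming, pv_sorted_eq_flatMap]
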